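-- pv_equiv track=rewrite | github.com/atharhive/CareLens | backend/app/extract/unit_converter.py | _get_conversion_category
-- ===== SOURCE A (Python) =====
-- from typing import Dict, Optional, Tuple, Any, List
--
-- def _get_conversion_category(test_name: str) -> Optional[str]:
--     """Get the conversion category for a test name."""
--     category_mappings = {
--         "glucose": ["glucose_fasting", "glucose_random"],
--         "cholesterol": ["cholesterol_total", "cholesterol_hdl", "cholesterol_ldl"],
--         "triglycerides": ["triglycerides"],
--         "creatinine": ["creatinine"],
--         "urea": ["bun"],
--         "bilirubin": ["bilirubin_total", "bilirubin_direct"],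
--         "protein": ["albumin", "total_protein"],
--         "hemoglobin": ["hemoglobin"],
--         "thyroid": ["tsh", "t3", "t4", "free_t3", "free_t4"]
--     }
--
--     for category, test_list in category_mappings.items():
--         if test_name in test_list:
--             return category
--
--     return None
-- ===== SOURCE B (Python) =====
-- from typing import Optional
--
-- # Flat (test, category) pairs sorted by test name; lookup is a hand-written
-- # binary search, replacing A's linear scan over category lists.
-- _SORTED_PAIRS = (
--     ("albumin", "protein"),
--     ("bilirubin_direct", "bilirubin"),
--     ("bilirubin_total", "bilirubin"),
--     ("bun", "urea"),
--     ("cholesterol_hdl", "cholesterol"),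
--     ("cholesterol_ldl", "cholesterol"),
--     ("cholesterol_total", "cholesterol"),
--     ("creatinine", "creatinine"),
--     ("free_t3", "thyroid"),
--     ("free_t4", "thyroid"),
--     ("glucose_fasting", "glucose"),
--     ("glucose_random", "glucose"),
--     ("hemoglobin", "hemoglobin"),
--     ("t3", "thyroid"),
--     ("t4", "thyroid"),
--     ("total_protein", "protein"),
--     ("triglycerides", "triglycerides"),
--     ("tsh", "thyroid"),
-- )
--
-- def _get_conversion_category(test_name: str) -> Optional[str]:
--     """Get the conversion category for a test name."""
--     lo, hi = 0, len(_SORTED_PAIRS)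
--     while lo < hi:
--         mid = (lo + hi) // 2
--         key, category = _SORTED_PAIRS[mid]
--         if key == test_name:
--             return category
--         if key < test_name:
--             lo = mid + 1
--         else:
--             hi = mid
--     return None
-- ===== Notes on version B (the rewrite author's own statement) =====
-- stated objective: alternative
-- what changed: Replaced the per-call linear scan over category->test-list pairs with a flat (test, category) array sorted by test name and a hand-written binary-search loop; the test lists are pairwise disjoint so no precedence is lost.
import Mathlib
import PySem

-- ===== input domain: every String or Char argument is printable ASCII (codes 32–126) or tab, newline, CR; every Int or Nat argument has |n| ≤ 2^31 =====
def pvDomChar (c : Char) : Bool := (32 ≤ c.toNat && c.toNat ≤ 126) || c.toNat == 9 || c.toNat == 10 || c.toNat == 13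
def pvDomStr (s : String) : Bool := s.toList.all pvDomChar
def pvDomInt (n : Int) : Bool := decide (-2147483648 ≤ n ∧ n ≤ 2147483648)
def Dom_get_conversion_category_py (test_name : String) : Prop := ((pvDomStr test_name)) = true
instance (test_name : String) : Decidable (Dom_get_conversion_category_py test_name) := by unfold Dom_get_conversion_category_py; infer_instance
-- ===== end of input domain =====

-- B replaces A's linear scan over category→test-list pairs with binary search in a
-- flat array of (test, category) pairs sorted by test name (alternative; return value only).

-- ===== PORT A =====
def pvCategoryMappings : List (String × List String) :=
  [("glucose", ["glucose_fasting", "glucose_random"]),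
   ("cholesterol", ["cholesterol_total", "cholesterol_hdl", "cholesterol_ldl"]),
   ("triglycerides", ["triglycerides"]),
   ("creatinine", ["creatinine"]),
   ("urea", ["bun"]),
   ("bilirubin", ["bilirubin_total", "bilirubin_direct"]),
   ("protein", ["albumin", "total_protein"]),
   ("hemoglobin", ["hemoglobin"]),
   ("thyroid", ["tsh", "t3", "t4", "free_t3", "free_t4"])]

-- the 'for category, test_list in …' loop: first category whose list contains test_name
def pvScanCats (test_name : String) : List (String × List String) → Option String
  | [] => none
  | (category, test_list) :: rest =>
      if test_list.contains test_name then some category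
      else pvScanCats test_name rest

def get_conversion_category_py (test_name : String) : Option String :=
  pvScanCats test_name pvCategoryMappings

-- ===== PORT B =====
def pvSortedPairs : List (String × String) :=
  [("albumin", "protein"), ("bilirubin_direct", "bilirubin"),
   ("bilirubin_total", "bilirubin"), ("bun", "urea"),
   ("cholesterol_hdl", "cholesterol"), ("cholesterol_ldl", "cholesterol"),
   ("cholesterol_total", "cholesterol"), ("creatinine", "creatinine"),
   ("free_t3", "thyroid"), ("free_t4", "thyroid"),
   ("glucose_fasting", "glucose"), ("glucose_random", "glucose"),
   ("hemoglobin", "hemoglobin"), ("t3", "thyroid"), ("t4", "thyroid"),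
   ("total_protein", "protein"), ("triglycerides", "triglycerides"),
   ("tsh", "thyroid")]

-- the 'while lo < hi' binary-search loop of Source B; fuel bounds the iteration count
def pvBSearch (test_name : String) : Nat → Nat → Nat → Option String
  | 0, _, _ => none
  | fuel + 1, lo, hi =>
      if lo < hi then
        let mid := (lo + hi) / 2
        match pvSortedPairs[mid]? with
        | none => none
        | some (key, category) =>
            if key = test_name then some category
            else if key.toList < test_name.toList then pvBSearch test_name fuel (mid + 1) hi
            else pvBSearch test_name fuel lo mid
      else none

def get_conversion_category_py_alt (test_name : String) : Option String :=
  pvBSearch test_name pvSortedPairs.length 0 pvSortedPairs.length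

-- ===== PRECONDITION & SPEC =====
def Spec_get_conversion_category_py (test_name : String) (out : Option String) : Prop := out = get_conversion_category_py_alt test_name
instance (test_name : String) (out : Option String) : Decidable (Spec_get_conversion_category_py test_name out) := by unfold Spec_get_conversion_category_py; infer_instance

-- ===== CLAIM (what is proved, stated in full; the proofs are below) =====
def Claim_equal_get_conversion_category_py : Prop := ∀ (test_name : String), Dom_get_conversion_category_py test_name → Spec_get_conversion_category_py test_name (get_conversion_category_py test_name)

-- ===== LEMMAS AND PROOFS =====
def pvAllTests : List String :=
  ["glucose_fasting", "glucose_random", "cholesterol_total", "cholesterol_hdl",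
   "cholesterol_ldl", "triglycerides", "creatinine", "bun", "bilirubin_total",
   "bilirubin_direct", "albumin", "total_protein", "hemoglobin", "tsh", "t3",
   "t4", "free_t3", "free_t4"]

-- binary search only returns a category found paired with the searched key
theorem pvBSearch_some_mem (s : String) :
    ∀ (fuel lo hi : Nat) (c : String),
      pvBSearch s fuel lo hi = some c → (s, c) ∈ pvSortedPairs := by
  intro fuel
  induction fuel with
  | zero => intro lo hi c h; simp [pvBSearch] at h
  | succ n ih =>
      intro lo hi c h
      unfold pvBSearch at h
      by_cases hlh : lo < hi
      · simp only [hlh, if_true] at h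
        cases hm : pvSortedPairs[(lo + hi) / 2]? with
        | none => rw [hm] at h; simp at h
        | some p =>
            obtain ⟨key, category⟩ := p
            rw [hm] at h
            simp only at h
            by_cases hk : key = s
            · simp only [hk, if_true] at h
              obtain rfl : category = c := by simpa using h
              subst hk
              exact List.mem_of_getElem? hm
            · simp only [hk, if_false] at h
              by_cases hlt : key.toList < s.toList
              · simp only [hlt, if_true] at h; exact ih _ _ _ h
              · simp only [hlt, if_false] at h; exact ih _ _ _ h
      · simp [hlh] at h

theorem pv_agree (s : String) :
    get_conversion_category_py s = get_conversion_category_py_alt s := by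
  by_cases hmem : s ∈ pvAllTests
  · simp only [pvAllTests, List.mem_cons, List.not_mem_nil, or_false] at hmem
    rcases hmem with h | h | h | h | h | h | h | h | h | h | h | h | h | h | h | h | h | h <;>
      subst h <;> decide
  · simp only [pvAllTests, List.mem_cons, List.not_mem_nil, or_false, not_or] at hmem
    obtain ⟨h1, h2, h3, h4, h5, h6, h7, h8, h9, h10, h11, h12, h13, h14, h15, h16, h17, h18⟩ := hmem
    have hA : get_conversion_category_py s = none := by
      simp [get_conversion_category_py, pvScanCats, pvCategoryMappings,
        List.contains_eq_mem, List.mem_cons, h1, h2, h3, h4, h5, h6, h7, h8, h9, h10,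
        h11, h12, h13, h14, h15, h16, h17, h18]
    have hB : get_conversion_category_py_alt s = none := by
      cases hb : get_conversion_category_py_alt s with
      | none => rfl
      | some c =>
          have hm := pvBSearch_some_mem s _ _ _ c hb
          simp only [pvSortedPairs, List.mem_cons, List.not_mem_nil, or_false,
            Prod.mk.injEq] at hm
          rcases hm with ⟨h, _⟩ | ⟨h, _⟩ | ⟨h, _⟩ | ⟨h, _⟩ | ⟨h, _⟩ | ⟨h, _⟩ | ⟨h, _⟩ |
            ⟨h, _⟩ | ⟨h, _⟩ | ⟨h, _⟩ | ⟨h, _⟩ | ⟨h, _⟩ | ⟨h, _⟩ | ⟨h, _⟩ | ⟨h, _⟩ |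
            ⟨h, _⟩ | ⟨h, _⟩ | ⟨h, _⟩ <;>
            first
            | exact absurd h h1 | exact absurd h h2 | exact absurd h h3
            | exact absurd h h4 | exact absurd h h5 | exact absurd h h6
            | exact absurd h h7 | exact absurd h h8 | exact absurd h h9
            | exact absurd h h10 | exact absurd h h11 | exact absurd h h12
            | exact absurd h h13 | exact absurd h h14 | exact absurd h h15
            | exact absurd h h16 | exact absurd h h17 | exact absurd h h18
    rw [hA, hB]

-- ===== VERDICT (by name: the statement is the Claim_ definition above) =====
theorem get_conversion_category_py_spec : Claim_equal_get_conversion_category_py := by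
  intro s _
  unfold Spec_get_conversion_category_py
  exact pv_agree s
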